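-- pv_equiv track=rewrite | github.com/balwierz/Codility | refuelling.py | solution
-- ===== SOURCE A (Python) =====
-- import collections
--
-- def solution(fuel, pos):
--     state = collections.defaultdict(int)
--     for i in range(len(pos)):
--         state[(i, True)] = fuel[i] # left position, 0/1 which end left/right we are at, value fuel in the tank
--     width = -1
--     while len(state):
--         newState = collections.defaultdict(int)
--         width += 1
--         for [left, side], tank in state.items():
--             if left:  # try to extend to the left
--                 val = tank - pos[left + width * side] + pos[left-1]
--                 if val >= 0:  # there is enough fuel to get to city left-1
--                     key = (left-1, False)
--                     newState[key] = max(newState[key], val + fuel[left-1])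
--             if left + width + 1 < len(pos):  # try extending to the right
--                 val = tank - pos[left + width + 1] + pos[left + width * side]
--                 if val >= 0: # there is enough fuel to get to city left + width + 1
--                     key = (left, True)
--                     newState[key] = max(newState[key], val + fuel[left + width + 1])
--         state = newState
--     return width + 1
-- ===== SOURCE B (Python) =====
-- def solution(fuel, pos):
--     # Right-to-left row sweep over left endpoints: row l holds, for every right
--     # end r, the best tank standing at the left/right end of the interval [l, r]
--     # (None = not coverable; the tank is clamped at 0, it can never be negative).
--     # Each cell is pulled from (l, r-1) in the same row and (l+1, r) in the
--     # previous row; a row stops once every further cell is provably dead.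
--     # The answer is the size of the largest coverable interval.
--     n = len(pos)
--     if n == 0:
--         return 0
--     best = 1
--     prevF = [None] * n       # row l+1, value at the left end
--     prevT = [None] * n       # row l+1, value at the right end
--     prev_max = n - 1         # rightmost r that may be alive in the previous row
--     for l in range(n - 1, -1, -1):
--         curF = [None] * n
--         curT = [None] * n
--         curF[l] = fuel[l]
--         curT[l] = fuel[l]
--         mx = l
--         r = l
--         while r + 1 < n and (r <= prev_max or curF[r] is not None or curT[r] is not None):
--             r += 1
--             # at the left end of [l, r]: arrive from [l+1, r]
--             c = None
--             t = prevF[r]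
--             if t is not None and t - pos[l + 1] + pos[l] >= 0:
--                 c = t - pos[l + 1] + pos[l]
--             t = prevT[r]
--             if t is not None:
--                 v = t - pos[r] + pos[l]
--                 if v >= 0 and (c is None or v > c):
--                     c = v
--             nf = None if c is None else max(0, c + fuel[l])
--             # at the right end of [l, r]: arrive from [l, r-1]
--             c = None
--             t = curF[r - 1]
--             if t is not None and t - pos[r] + pos[l] >= 0:
--                 c = t - pos[r] + pos[l]
--             t = curT[r - 1]
--             if t is not None:
--                 v = t - pos[r] + pos[r - 1]
--                 if v >= 0 and (c is None or v > c):
--                     c = v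
--             nt = None if c is None else max(0, c + fuel[r])
--             curF[r] = nf
--             curT[r] = nt
--             if nf is not None or nt is not None:
--                 mx = r
--         if mx - l + 1 > best:
--             best = mx - l + 1
--         prevF, prevT, prev_max = curF, curT, mx
--     return best
-- ===== Notes on version B (the rewrite author's own statement) =====
-- stated objective: alternative
-- what changed: A pushes a breadth-first frontier dict of (left,end) states outward width by width until it empties; B sweeps left endpoints right-to-left, pulling each interval's two end-values from the previous row into flat arrays with a per-row cutoff once all further cells are provably dead, and returns the largest live interval size.
import Mathlib
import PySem

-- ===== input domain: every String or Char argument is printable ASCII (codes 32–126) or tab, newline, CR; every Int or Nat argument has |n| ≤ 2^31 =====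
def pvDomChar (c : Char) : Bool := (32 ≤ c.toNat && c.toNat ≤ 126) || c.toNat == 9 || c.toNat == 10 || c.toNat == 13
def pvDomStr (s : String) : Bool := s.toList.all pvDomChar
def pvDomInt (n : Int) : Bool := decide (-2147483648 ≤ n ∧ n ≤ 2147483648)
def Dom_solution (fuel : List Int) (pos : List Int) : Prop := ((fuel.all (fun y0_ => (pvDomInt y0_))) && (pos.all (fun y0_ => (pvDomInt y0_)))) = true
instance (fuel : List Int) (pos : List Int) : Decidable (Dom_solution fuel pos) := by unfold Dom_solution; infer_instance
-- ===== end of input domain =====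

-- B replaces A's push-style breadth-first frontier (a dict of (left,end) states grown
-- width by width until empty) by a right-to-left sweep over left endpoints that pulls
-- each interval's two end-values from the previous row, with a per-row cutoff once all
-- further cells are provably dead (alternative decomposition, similar cost).

-- ===== PORT A =====
-- one step of the `for [left, side], tank in state.items():` body
def pvA_body (fuel pos : List Int) (width : Int)
    (ns : PySem.Dict (Int × Bool) Int) (x : (Int × Bool) × Int) : PySem.Dict (Int × Bool) Int :=
  let left := x.1.1
  let side := x.1.2
  let tank := x.2
  let ns :=
    if left ≠ 0 then   -- `if left:` — try to extend to the left
      let val := tank - PySem.List.pyGetD pos (left + width * (if side then 1 else 0)) 0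
                  + PySem.List.pyGetD pos (left - 1) 0
      if 0 ≤ val then
        ns.insert (left - 1, false)
          (max (ns.getD (left - 1, false) 0) (val + PySem.List.pyGetD fuel (left - 1) 0))
      else ns
    else ns
  if left + width + 1 < (pos.length : Int) then   -- try extending to the right
    let val := tank - PySem.List.pyGetD pos (left + width + 1) 0
                + PySem.List.pyGetD pos (left + width * (if side then 1 else 0)) 0
    if 0 ≤ val then
      ns.insert (left, true)
        (max (ns.getD (left, true) 0) (val + PySem.List.pyGetD fuel (left + width + 1) 0))
    else ns
  else ns

-- `while len(state):` — the loop runs at most len(pos)+1 times, fuel len(pos)+2 never runs out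
def pvA_loop (fuel pos : List Int) : Nat → PySem.Dict (Int × Bool) Int → Int → Int
  | 0, _, width => width + 1
  | Nat.succ k, state, width =>
    if state.size = 0 then width + 1
    else
      let width := width + 1
      let newState := state.items.foldl (pvA_body fuel pos width) (PySem.Dict.mk [])
      pvA_loop fuel pos k newState width

def solution (fuel : List Int) (pos : List Int) : Int :=
  let state := (PySem.List.pyRange 0 (pos.length : Int)).foldl
    (fun st i => st.insert (i, true) (PySem.List.pyGetD fuel i 0)) (PySem.Dict.mk [])
  pvA_loop fuel pos (pos.length + 2) state (-1)

-- ===== PORT B =====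
-- In-range Python indexing xs[i] is ported as List.getD (exact for every index the
-- loops reach under Pre_solution); `for l in range(n-1,-1,-1)` is ported as a fold over
-- the reversed Nat range and the inner `while` as fuel-bounded recursion (it makes at
-- most n-1 steps, so fuel n-1 is never exhausted) — both exact.
-- the body of one `while` iteration: the two end-values of the interval [l, r]
def pvB_step (fuel pos : List Int) (l r : Nat)
    (prevF prevT curF curT : List (Option Int)) : Option Int × Option Int :=
  -- at the left end of [l, r]: arrive from [l+1, r]
  let c : Option Int := none
  let c := match prevF.getD r none with
    | some t =>
      let v := t - pos.getD (l + 1) 0 + pos.getD l 0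
      if 0 ≤ v then some v else c
    | none => c
  let c := match prevT.getD r none with
    | some t =>
      let v := t - pos.getD r 0 + pos.getD l 0
      if 0 ≤ v ∧ (c = none ∨ c.getD 0 < v) then some v else c
    | none => c
  let nf : Option Int := c.map (fun c => max 0 (c + fuel.getD l 0))
  -- at the right end of [l, r]: arrive from [l, r-1]
  let c : Option Int := none
  let c := match curF.getD (r - 1) none with
    | some t =>
      let v := t - pos.getD r 0 + pos.getD l 0
      if 0 ≤ v then some v else c
    | none => c
  let c := match curT.getD (r - 1) none with
    | some t =>
      let v := t - pos.getD r 0 + pos.getD (r - 1) 0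
      if 0 ≤ v ∧ (c = none ∨ c.getD 0 < v) then some v else c
    | none => c
  let nt : Option Int := c.map (fun c => max 0 (c + fuel.getD r 0))
  (nf, nt)

-- `while r + 1 < n and (r <= prev_max or curF[r] is not None or curT[r] is not None):`
def pvB_while (fuel pos : List Int) (n l prevMax : Nat) (prevF prevT : List (Option Int)) :
    Nat → Nat → List (Option Int) → List (Option Int) → Nat →
      List (Option Int) × List (Option Int) × Nat
  | 0, _, curF, curT, mx => (curF, curT, mx)
  | Nat.succ k, r, curF, curT, mx =>
    if r + 1 < n ∧ (r ≤ prevMax ∨ (curF.getD r none).isSome ∨ (curT.getD r none).isSome) then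
      pvB_while fuel pos n l prevMax prevF prevT k (r + 1)
        (curF.set (r + 1) (pvB_step fuel pos l (r + 1) prevF prevT curF curT).1)
        (curT.set (r + 1) (pvB_step fuel pos l (r + 1) prevF prevT curF curT).2)
        (if (pvB_step fuel pos l (r + 1) prevF prevT curF curT).1.isSome ∨
            (pvB_step fuel pos l (r + 1) prevF prevT curF curT).2.isSome then r + 1 else mx)
    else (curF, curT, mx)

-- one iteration of `for l in range(n-1, -1, -1):`
def pvB_row (fuel pos : List Int) (n l prevMax : Nat) (prevF prevT : List (Option Int)) :
    List (Option Int) × List (Option Int) × Nat :=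
  let curF := (List.replicate n (none : Option Int)).set l (some (fuel.getD l 0))
  let curT := (List.replicate n (none : Option Int)).set l (some (fuel.getD l 0))
  pvB_while fuel pos n l prevMax prevF prevT (n - 1) l curF curT l

-- the body of one `for l in range(n-1, -1, -1):` iteration (state: prevF, prevT, prev_max, best)
def pvB_outer (fuel pos : List Int) (n : Nat)
    (st : List (Option Int) × List (Option Int) × Nat × Int) (l : Nat) :
    List (Option Int) × List (Option Int) × Nat × Int :=
  ((pvB_row fuel pos n l st.2.2.1 st.1 st.2.1).1,
   (pvB_row fuel pos n l st.2.2.1 st.1 st.2.1).2.1,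
   (pvB_row fuel pos n l st.2.2.1 st.1 st.2.1).2.2,
   if st.2.2.2 < (((pvB_row fuel pos n l st.2.2.1 st.1 st.2.1).2.2 - l + 1 : Nat) : Int)
   then (((pvB_row fuel pos n l st.2.2.1 st.1 st.2.1).2.2 - l + 1 : Nat) : Int)
   else st.2.2.2)

def solution_alt (fuel : List Int) (pos : List Int) : Int :=
  let n := pos.length
  if n = 0 then 0
  else
    (((List.range n).reverse).foldl (pvB_outer fuel pos n)
      ((List.replicate n (none : Option Int), List.replicate n (none : Option Int),
        n - 1, (1 : Int)))).2.2.2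

-- shared spec: pvS fuel pos w l side = A's state value for interval [l, l+w], standing at
-- the left (side = false) or right (side = true) end; none = no such state
-- ===== PRECONDITION & SPEC =====
-- Pre_ excludes exactly the inputs where A raises: fuel shorter than pos (fuel[i] IndexError).
def Pre_solution (fuel : List Int) (pos : List Int) : Prop := pos.length ≤ fuel.length
instance (fuel : List Int) (pos : List Int) : Decidable (Pre_solution fuel pos) := by
  unfold Pre_solution; infer_instance

def pvWitness_solution : List Int × List Int := ([3, 1, 2], [0, 4, 6])

def Spec_solution (fuel : List Int) (pos : List Int) (out : Int) : Prop := out = solution_alt fuel pos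
instance (fuel : List Int) (pos : List Int) (out : Int) : Decidable (Spec_solution fuel pos out) := by
  unfold Spec_solution; infer_instance

-- ===== CLAIM =====
def Claim_equal_solution : Prop := ∀ (fuel : List Int) (pos : List Int), Dom_solution fuel pos → Pre_solution fuel pos → Spec_solution fuel pos (solution fuel pos)

-- ===== LEMMAS AND PROOFS =====

-- shared spec: pvS fuel pos w l side = A's state value for interval [l, l+w], standing at
-- the left (side = false) or right (side = true) end; none = no such state
def pvCmb (acc o : Option Int) : Option Int :=
  match o with
  | none => acc
  | some v => some (max (acc.getD 0) v)

def pvExt (t : Option Int) (a b : Int) : Option Int :=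
  t.bind fun tank => if 0 ≤ tank - a + b then some (tank - a + b) else none

def pvS (fuel pos : List Int) : Nat → Nat → Bool → Option Int
  | 0, l, side => if side = true ∧ l < pos.length then some (fuel.getD l 0) else none
  | w + 1, l, side =>
    if side = true then
      if l + w + 1 < pos.length then
        pvCmb (pvCmb none
            ((pvExt (pvS fuel pos w l false) (pos.getD (l+w+1) 0) (pos.getD l 0)).map
              (· + fuel.getD (l+w+1) 0)))
          ((pvExt (pvS fuel pos w l true) (pos.getD (l+w+1) 0) (pos.getD (l+w) 0)).map
            (· + fuel.getD (l+w+1) 0))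
      else none
    else
      pvCmb (pvCmb none
          ((pvExt (pvS fuel pos w (l+1) false) (pos.getD (l+1) 0) (pos.getD l 0)).map
            (· + fuel.getD l 0)))
        ((pvExt (pvS fuel pos w (l+1) true) (pos.getD (l+w+1) 0) (pos.getD l 0)).map
          (· + fuel.getD l 0))

def pvAlive (fuel pos : List Int) (w : Nat) : Bool :=
  (List.range pos.length).any fun l => (pvS fuel pos w l false).isSome || (pvS fuel pos w l true).isSome

def pvSpecLoop (fuel pos : List Int) : Nat → Nat → Int
  | 0, w => (w : Int)
  | k + 1, w => if pvAlive fuel pos w then pvSpecLoop fuel pos k (w + 1) else (w : Int)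

-- S' on Int keys (A's dict keys)
def pvS' (fuel pos : List Int) (w : Nat) (l : Int) (side : Bool) : Option Int :=
  if 0 ≤ l then pvS fuel pos w l.toNat side else none

-- the contribution of one processed item x to target key k in A's inner loop
def pvContrib (fuel pos : List Int) (w : Int) (x : (Int × Bool) × Int) (k : Int × Bool) : Option Int :=
  let left := x.1.1
  let s01 : Int := if x.1.2 then 1 else 0
  let tank := x.2
  if k = (left - 1, false) then
    let val := tank - PySem.List.pyGetD pos (left + w * s01) 0 + PySem.List.pyGetD pos (left - 1) 0
    if left ≠ 0 ∧ 0 ≤ val then some (val + PySem.List.pyGetD fuel (left - 1) 0) else none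
  else if k = (left, true) then
    let val := tank - PySem.List.pyGetD pos (left + w + 1) 0 + PySem.List.pyGetD pos (left + w * s01) 0
    if left + w + 1 < (pos.length : Int) ∧ 0 ≤ val then
      some (val + PySem.List.pyGetD fuel (left + w + 1) 0)
    else none
  else none

def pvLook (I : List ((Int × Bool) × Int)) (k : Int × Bool)
    (g : (Int × Bool) × Int → Option Int) : Option Int :=
  match I.find? (fun x => x.1 == k) with
  | some x => g x
  | none => none

def pvInv (fuel pos : List Int) (w : Nat) (st : PySem.Dict (Int × Bool) Int) : Prop :=
  st.keys.Nodup ∧ ∀ (l : Int) (side : Bool), st.get? (l, side) = pvS' fuel pos w l side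

theorem pvA_body_get? (fuel pos : List Int) (w : Int) (ns : PySem.Dict (Int × Bool) Int)
    (x : (Int × Bool) × Int) (k : Int × Bool) :
    (pvA_body fuel pos w ns x).get? k = pvCmb (ns.get? k) (pvContrib fuel pos w x k) := by
  rcases x with ⟨⟨left, side⟩, tank⟩
  have hne : ((left - 1, false) : Int × Bool) ≠ (left, true) := by simp
  have push : ∀ (d : PySem.Dict (Int × Bool) Int) (kk : Int × Bool) (v : Int),
      (d.insert kk (max (d.getD kk 0) v)).get? k
        = pvCmb (d.get? k) (if k = kk then some v else none) := by
    intro d kk v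
    by_cases hkk : k = kk <;>
      simp [hkk, PySem.Dict.get?_insert, PySem.Dict.getD_eq_get?_getD, pvCmb]
  simp only [pvA_body, pvContrib]
  by_cases hz : left ≠ 0 <;>
    by_cases hvL : (0:Int) ≤ tank - PySem.List.pyGetD pos (left + w * (if side then 1 else 0)) 0
      + PySem.List.pyGetD pos (left - 1) 0 <;>
    by_cases hb : left + w + 1 < (pos.length : Int) <;>
    by_cases hvR : (0:Int) ≤ tank - PySem.List.pyGetD pos (left + w + 1) 0
      + PySem.List.pyGetD pos (left + w * (if side then 1 else 0)) 0 <;>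
    simp only [hz, hvL, hb, hvR, if_true, if_false, ite_true, ite_false, not_true,
      not_false_iff, true_and, false_and, and_true, and_false, if_pos, if_neg,
      not_not] <;>
    (try simp only [push]) <;>
    by_cases hkL : k = (left - 1, false) <;> by_cases hkR : k = (left, true) <;>
    first
      | exact absurd (hkL.symm.trans hkR) hne
      | simp [push, hz, hvL, hb, hvR, hkL, hkR, pvCmb, hne, Ne.symm hne,
          PySem.Dict.getD_eq_get?_getD, PySem.Dict.getD_insert, PySem.Dict.get?_insert]

theorem pvA_body_nodup (fuel pos : List Int) (w : Int) (ns : PySem.Dict (Int × Bool) Int)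
    (x : (Int × Bool) × Int) (h : ns.keys.Nodup) : (pvA_body fuel pos w ns x).keys.Nodup := by
  rcases x with ⟨⟨left, side⟩, tank⟩
  simp only [pvA_body]
  split_ifs <;>
    first
      | exact PySem.Dict.nodup_keys_insert _ _ _ (PySem.Dict.nodup_keys_insert _ _ _ h)
      | exact PySem.Dict.nodup_keys_insert _ _ _ h
      | exact h

theorem pvFoldA_get? (fuel pos : List Int) (w : Int) (I : List ((Int × Bool) × Int)) :
    ∀ (d : PySem.Dict (Int × Bool) Int) (k : Int × Bool),
    (I.foldl (pvA_body fuel pos w) d).get? k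
      = I.foldl (fun acc x => pvCmb acc (pvContrib fuel pos w x k)) (d.get? k) := by
  induction I with
  | nil => intro d k; rfl
  | cons x I ih =>
    intro d k
    rw [List.foldl_cons, List.foldl_cons, ih, pvA_body_get?]

theorem pvFoldA_nodup (fuel pos : List Int) (w : Int) (I : List ((Int × Bool) × Int)) :
    ∀ (d : PySem.Dict (Int × Bool) Int), d.keys.Nodup →
    (I.foldl (pvA_body fuel pos w) d).keys.Nodup := by
  induction I with
  | nil => intro d h; exact h
  | cons x I ih =>
    intro d h
    exact ih _ (pvA_body_nodup fuel pos w d x h)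

theorem pvCmb_comm (acc o1 o2 : Option Int) :
    pvCmb (pvCmb acc o1) o2 = pvCmb (pvCmb acc o2) o1 := by
  cases o1 <;> cases o2 <;> simp [pvCmb] <;> cases acc <;>
    simp [max_comm, max_assoc, max_left_comm]

theorem pvLook_cons_pos (x : (Int × Bool) × Int) (I : List ((Int × Bool) × Int))
    (k1 : Int × Bool) (g : (Int × Bool) × Int → Option Int) (hx : x.1 = k1) :
    pvLook (x :: I) k1 g = g x := by
  rw [pvLook, List.find?_cons_of_pos (by simpa using hx)]

theorem pvLook_cons_neg (x : (Int × Bool) × Int) (I : List ((Int × Bool) × Int))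
    (k1 : Int × Bool) (g : (Int × Bool) × Int → Option Int) (hx : x.1 ≠ k1) :
    pvLook (x :: I) k1 g = pvLook I k1 g := by
  rw [pvLook, List.find?_cons_of_neg (by simpa using hx)]
  rfl

theorem pvNoneFold (I : List ((Int × Bool) × Int)) (g : (Int × Bool) × Int → Option Int)
    (h : ∀ y ∈ I, g y = none) :
    ∀ acc, I.foldl (fun a x => pvCmb a (g x)) acc = acc := by
  induction I with
  | nil => intro acc; rfl
  | cons x I ih =>
    intro acc
    rw [List.foldl_cons, h x List.mem_cons_self]
    exact ih (fun y hy => h y (List.mem_cons_of_mem _ hy)) acc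

theorem pvOneKeyFold (I : List ((Int × Bool) × Int)) (hn : (I.map Prod.fst).Nodup)
    (g : (Int × Bool) × Int → Option Int) (k1 : Int × Bool)
    (hg : ∀ x ∈ I, g x ≠ none → x.1 = k1) :
    ∀ acc, I.foldl (fun a x => pvCmb a (g x)) acc = pvCmb acc (pvLook I k1 g) := by
  induction I with
  | nil => intro acc; simp [pvLook, pvCmb]
  | cons x I ih =>
    intro acc
    simp only [List.map_cons, List.nodup_cons] at hn
    rw [List.foldl_cons]
    by_cases hx : x.1 = k1
    · have hrest : ∀ y ∈ I, g y = none := by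
        intro y hy
        by_contra hc
        have hy1 : y.1 = k1 := hg y (List.mem_cons_of_mem _ hy) hc
        have hmem : y.1 ∈ List.map Prod.fst I := List.mem_map_of_mem hy
        rw [hy1, ← hx] at hmem
        exact hn.1 hmem
      rw [pvNoneFold I g hrest, pvLook_cons_pos x I k1 g hx]
    · have hgx : g x = none := by
        by_contra hc
        exact hx (hg x List.mem_cons_self hc)
      rw [hgx]
      show List.foldl _ acc I = _
      rw [ih hn.2 (fun y hy => hg y (List.mem_cons_of_mem _ hy)) acc,
        pvLook_cons_neg x I k1 g hx]

theorem pvTwoKeyFold (I : List ((Int × Bool) × Int)) (hn : (I.map Prod.fst).Nodup)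
    (g : (Int × Bool) × Int → Option Int) (k1 k2 : Int × Bool) (hk : k1 ≠ k2)
    (hg : ∀ x ∈ I, g x ≠ none → x.1 = k1 ∨ x.1 = k2) :
    ∀ acc, I.foldl (fun a x => pvCmb a (g x)) acc
      = pvCmb (pvCmb acc (pvLook I k1 g)) (pvLook I k2 g) := by
  induction I with
  | nil => intro acc; simp [pvLook, pvCmb]
  | cons x I ih =>
    intro acc
    simp only [List.map_cons, List.nodup_cons] at hn
    rw [List.foldl_cons]
    by_cases h1 : x.1 = k1
    · have hrest : ∀ y ∈ I, g y ≠ none → y.1 = k2 := by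
        intro y hy hc
        rcases hg y (List.mem_cons_of_mem _ hy) hc with h | h
        · exfalso
          have hmem : y.1 ∈ List.map Prod.fst I := List.mem_map_of_mem hy
          rw [h, ← h1] at hmem
          exact hn.1 hmem
        · exact h
      rw [pvOneKeyFold I hn.2 g k2 hrest, pvLook_cons_pos x I k1 g h1,
        pvLook_cons_neg x I k2 g (by rw [h1]; exact hk)]
    · by_cases h2 : x.1 = k2
      · have hrest : ∀ y ∈ I, g y ≠ none → y.1 = k1 := by
          intro y hy hc
          rcases hg y (List.mem_cons_of_mem _ hy) hc with h | h
          · exact h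
          · exfalso
            have hmem : y.1 ∈ List.map Prod.fst I := List.mem_map_of_mem hy
            rw [h, ← h2] at hmem
            exact hn.1 hmem
        rw [pvOneKeyFold I hn.2 g k1 hrest, pvLook_cons_pos x I k2 g h2,
          pvLook_cons_neg x I k1 g (by rw [h2]; exact Ne.symm hk), pvCmb_comm]
      · have hgx : g x = none := by
          by_contra hc
          rcases hg x List.mem_cons_self hc with h | h
          · exact h1 h
          · exact h2 h
        rw [hgx]
        show List.foldl _ acc I = _
        rw [ih hn.2 (fun y hy => hg y (List.mem_cons_of_mem _ hy)) acc,
          pvLook_cons_neg x I k1 g h1, pvLook_cons_neg x I k2 g h2]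

theorem pvLook_get? (d : PySem.Dict (Int × Bool) Int) (k : Int × Bool)
    (g : (Int × Bool) × Int → Option Int) :
    pvLook d.items k g = match d.get? k with
      | some t => g (k, t)
      | none => none := by
  rw [pvLook, PySem.Dict.get?]
  cases hf : d.items.find? (fun p => p.1 == k) with
  | none => simp
  | some x =>
    have hx : x.1 = k := by simpa using (List.find?_eq_some_iff_append.1 hf).1
    simp only [Option.map_some]
    rw [show ((k, x.2) : (Int × Bool) × Int) = x from by rw [← hx]]

-- any live state covers a legal interval
theorem pvS_lt (fuel pos : List Int) (w l : Nat) (side : Bool) :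
    pvS fuel pos w l side ≠ none → l + w < pos.length := by
  induction w generalizing l side with
  | zero =>
    intro h
    simp only [pvS] at h
    split at h
    · omega
    · simp at h
  | succ w ih =>
    intro h
    simp only [pvS] at h
    rcases side with _ | _
    · simp only [Bool.false_eq_true, if_false] at h
      have : pvS fuel pos w (l+1) false ≠ none ∨ pvS fuel pos w (l+1) true ≠ none := by
        by_contra hc
        push_neg at hc
        rw [hc.1, hc.2] at h
        simp [pvExt, pvCmb] at h
      rcases this with h' | h' <;> have := ih _ _ h' <;> omega
    · by_cases hb : l + w + 1 < pos.length
      · omega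
      · simp [hb] at h

theorem pvExt_some (t a b : Int) :
    pvExt (some t) a b = if 0 ≤ t - a + b then some (t - a + b) else none := rfl

theorem pvContribL_false (fuel pos : List Int) (w lN : Nat) (t : Int) :
    pvContrib fuel pos (w : Int) ((((lN + 1 : Nat) : Int), false), t) (((lN : Nat) : Int), false)
      = (pvExt (some t) (pos.getD (lN + 1) 0) (pos.getD lN 0)).map (· + fuel.getD lN 0) := by
  simp only [pvContrib]
  rw [if_pos (show (((lN : Nat) : Int), false) = (((lN + 1 : Nat) : Int) - 1, false) from by
    simp only [Prod.mk.injEq, and_true]; push_cast; ring)]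
  simp only [if_true, if_false, ite_true, ite_false, Bool.false_eq_true, mul_zero, mul_one,
    add_zero]
  rw [show ((lN + 1 : Nat) : Int) - 1 = ((lN : Nat) : Int) from by push_cast; ring,
    PySem.List.pyGetD_natCast, PySem.List.pyGetD_natCast, PySem.List.pyGetD_natCast]
  by_cases hv : (0:Int) ≤ t - pos.getD (lN + 1) 0 + pos.getD lN 0
  · rw [if_pos ⟨by exact_mod_cast Nat.succ_ne_zero lN, hv⟩, pvExt_some, if_pos hv,
      Option.map_some]
  · rw [if_neg (fun hc => hv hc.2), pvExt_some, if_neg hv, Option.map_none]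

theorem pvContribL_true (fuel pos : List Int) (w lN : Nat) (t : Int) :
    pvContrib fuel pos (w : Int) ((((lN + 1 : Nat) : Int), true), t) (((lN : Nat) : Int), false)
      = (pvExt (some t) (pos.getD (lN + 1 + w) 0) (pos.getD lN 0)).map (· + fuel.getD lN 0) := by
  simp only [pvContrib]
  rw [if_pos (show (((lN : Nat) : Int), false) = (((lN + 1 : Nat) : Int) - 1, false) from by
    simp only [Prod.mk.injEq, and_true]; push_cast; ring)]
  simp only [if_true, if_false, ite_true, ite_false, mul_zero, mul_one, add_zero]
  rw [show ((lN + 1 : Nat) : Int) + (w : Int) = ((lN + 1 + w : Nat) : Int) from by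
      push_cast; ring,
    show ((lN + 1 : Nat) : Int) - 1 = ((lN : Nat) : Int) from by push_cast; ring,
    PySem.List.pyGetD_natCast, PySem.List.pyGetD_natCast, PySem.List.pyGetD_natCast]
  by_cases hv : (0:Int) ≤ t - pos.getD (lN + 1 + w) 0 + pos.getD lN 0
  · rw [if_pos ⟨by exact_mod_cast Nat.succ_ne_zero lN, hv⟩, pvExt_some, if_pos hv,
      Option.map_some]
  · rw [if_neg (fun hc => hv hc.2), pvExt_some, if_neg hv, Option.map_none]

theorem pvContribR_false (fuel pos : List Int) (w lN : Nat) (t : Int) :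
    pvContrib fuel pos (w : Int) ((((lN : Nat) : Int), false), t) (((lN : Nat) : Int), true)
      = if lN + w + 1 < pos.length then
          (pvExt (some t) (pos.getD (lN + w + 1) 0) (pos.getD lN 0)).map
            (· + fuel.getD (lN + w + 1) 0)
        else none := by
  simp only [pvContrib]
  rw [if_neg (show ¬ ((((lN : Nat) : Int), true) = (((lN : Nat) : Int) - 1, false)) from by
    simp)]
  simp only [if_true, if_false, ite_true, ite_false, Bool.false_eq_true, mul_zero, mul_one,
    add_zero]
  rw [show ((lN : Nat) : Int) + (w : Int) + 1 = ((lN + w + 1 : Nat) : Int) from by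
      push_cast; ring,
    PySem.List.pyGetD_natCast, PySem.List.pyGetD_natCast, PySem.List.pyGetD_natCast]
  by_cases hb : lN + w + 1 < pos.length
  · rw [if_pos hb]
    by_cases hv : (0:Int) ≤ t - pos.getD (lN + w + 1) 0 + pos.getD lN 0
    · rw [if_pos ⟨by exact_mod_cast hb, hv⟩, pvExt_some, if_pos hv, Option.map_some]
    · rw [if_neg (fun hc => hv hc.2), pvExt_some, if_neg hv, Option.map_none]
  · rw [if_neg hb, if_neg (fun hc => hb (by exact_mod_cast hc.1))]

theorem pvContribR_true (fuel pos : List Int) (w lN : Nat) (t : Int) :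
    pvContrib fuel pos (w : Int) ((((lN : Nat) : Int), true), t) (((lN : Nat) : Int), true)
      = if lN + w + 1 < pos.length then
          (pvExt (some t) (pos.getD (lN + w + 1) 0) (pos.getD (lN + w) 0)).map
            (· + fuel.getD (lN + w + 1) 0)
        else none := by
  simp only [pvContrib]
  rw [if_neg (show ¬ ((((lN : Nat) : Int), true) = (((lN : Nat) : Int) - 1, false)) from by
    simp)]
  simp only [if_true, if_false, ite_true, ite_false, mul_zero, mul_one, add_zero]
  rw [show ((lN : Nat) : Int) + (w : Int) + 1 = ((lN + w + 1 : Nat) : Int) from by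
      push_cast; ring,
    show ((lN : Nat) : Int) + (w : Int) = ((lN + w : Nat) : Int) from by push_cast; ring,
    PySem.List.pyGetD_natCast, PySem.List.pyGetD_natCast, PySem.List.pyGetD_natCast]
  by_cases hb : lN + w + 1 < pos.length
  · rw [if_pos hb]
    by_cases hv : (0:Int) ≤ t - pos.getD (lN + w + 1) 0 + pos.getD (lN + w) 0
    · rw [if_pos ⟨by exact_mod_cast hb, hv⟩, pvExt_some, if_pos hv, Option.map_some]
    · rw [if_neg (fun hc => hv hc.2), pvExt_some, if_neg hv, Option.map_none]
  · rw [if_neg hb, if_neg (fun hc => hb (by exact_mod_cast hc.1))]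

theorem pvStepA (fuel pos : List Int) (w : Nat) (st : PySem.Dict (Int × Bool) Int)
    (h : pvInv fuel pos w st) :
    pvInv fuel pos (w + 1) (st.items.foldl (pvA_body fuel pos (w : Int)) (PySem.Dict.mk [])) := by
  obtain ⟨hnd, hget⟩ := h
  have hkeys : (st.items.map Prod.fst).Nodup := by simpa [PySem.Dict.keys] using hnd
  refine ⟨pvFoldA_nodup fuel pos _ st.items (PySem.Dict.mk []) (by simp [PySem.Dict.keys]), ?_⟩
  intro l side
  rw [pvFoldA_get?]
  rw [show (PySem.Dict.mk [] : PySem.Dict (Int × Bool) Int).get? (l, side) = none from rfl]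
  cases side with
  | false =>
    rw [pvTwoKeyFold st.items hkeys _ (l + 1, false) (l + 1, true) (by simp)
      (by
        rintro ⟨⟨a, s⟩, t⟩ hx hgx
        simp only [pvContrib] at hgx
        by_cases h1 : ((l, false) : Int × Bool) = (a - 1, false)
        · have ha : a = l + 1 := by
            have := (Prod.mk.injEq .. ▸ h1).1
            omega
          subst ha
          cases s
          · exact Or.inl rfl
          · exact Or.inr rfl
        · rw [if_neg h1, if_neg (by simp)] at hgx
          exact absurd rfl hgx)]
    rw [pvLook_get? st, pvLook_get? st, hget, hget]
    by_cases h0 : 0 ≤ l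
    · obtain ⟨lN, rfl⟩ : ∃ lN : Nat, l = (lN : Int) := ⟨l.toNat, by omega⟩
      rw [show (lN : Int) + 1 = ((lN + 1 : Nat) : Int) from by push_cast; ring]
      simp only [pvS', Int.natCast_nonneg, if_true, Int.toNat_natCast]
      rw [show pvS fuel pos (w + 1) lN false
          = pvCmb (pvCmb none
              ((pvExt (pvS fuel pos w (lN+1) false) (pos.getD (lN+1) 0) (pos.getD lN 0)).map
                (· + fuel.getD lN 0)))
            ((pvExt (pvS fuel pos w (lN+1) true) (pos.getD (lN+w+1) 0) (pos.getD lN 0)).map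
              (· + fuel.getD lN 0)) from by
        simp [pvS]]
      cases hSf : pvS fuel pos w (lN + 1) false <;> cases hSt : pvS fuel pos w (lN + 1) true <;>
        simp only [pvContribL_false, pvContribL_true,
          show lN + 1 + w = lN + w + 1 from by omega, pvExt, pvCmb, Option.bind_none,
          Option.bind_some, Option.map_none, Option.map_some]
    · have hneg : ¬ (0 ≤ l) := h0
      by_cases hm1 : l = -1
      · subst hm1
        rw [show (-1 : Int) + 1 = ((0 : Nat) : Int) from by norm_num]
        simp only [pvS', Int.natCast_nonneg, if_true, Int.toNat_natCast,
          show ¬ ((0:Int) ≤ -1) from by norm_num, if_false]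
        cases hSf : pvS fuel pos w 0 false <;> cases hSt : pvS fuel pos w 0 true <;>
          simp [pvContrib, pvCmb, Prod.mk.injEq]
      · have h1 : ¬ ((0:Int) ≤ l + 1) := by omega
        simp only [pvS', if_neg h0, if_neg h1]
        rfl
  | true =>
    rw [pvTwoKeyFold st.items hkeys _ (l, false) (l, true) (by simp)
      (by
        rintro ⟨⟨a, s⟩, t⟩ hx hgx
        simp only [pvContrib] at hgx
        by_cases h1 : ((l, true) : Int × Bool) = (a - 1, false)
        · exact absurd h1 (by simp)
        · rw [if_neg h1] at hgx
          by_cases h2 : ((l, true) : Int × Bool) = (a, true)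
          · have ha : a = l := ((Prod.mk.injEq .. ▸ h2).1).symm
            subst ha
            cases s
            · exact Or.inl rfl
            · exact Or.inr rfl
          · rw [if_neg h2] at hgx
            exact absurd rfl hgx)]
    rw [pvLook_get? st, pvLook_get? st, hget, hget]
    by_cases h0 : 0 ≤ l
    · obtain ⟨lN, rfl⟩ : ∃ lN : Nat, l = (lN : Int) := ⟨l.toNat, by omega⟩
      simp only [pvS', Int.natCast_nonneg, if_true, Int.toNat_natCast]
      rw [show pvS fuel pos (w + 1) lN true
          = if lN + w + 1 < pos.length then
              pvCmb (pvCmb none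
                  ((pvExt (pvS fuel pos w lN false) (pos.getD (lN+w+1) 0) (pos.getD lN 0)).map
                    (· + fuel.getD (lN+w+1) 0)))
                ((pvExt (pvS fuel pos w lN true) (pos.getD (lN+w+1) 0) (pos.getD (lN+w) 0)).map
                  (· + fuel.getD (lN+w+1) 0))
            else none from by
        simp [pvS]]
      by_cases hb : lN + w + 1 < pos.length
      · rw [if_pos hb]
        cases hSf : pvS fuel pos w lN false <;> cases hSt : pvS fuel pos w lN true <;>
          simp only [pvContribR_false, pvContribR_true, if_pos hb, pvExt, pvCmb,
            Option.bind_none, Option.bind_some, Option.map_none, Option.map_some]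
      · rw [if_neg hb]
        cases hSf : pvS fuel pos w lN false <;> cases hSt : pvS fuel pos w lN true <;>
          simp only [pvContribR_false, pvContribR_true, if_neg hb, pvExt, pvCmb,
            Option.bind_none, Option.bind_some, Option.map_none, Option.map_some]
    · have h1 : ¬ ((0:Int) ≤ l) := h0
      simp only [pvS', if_neg h1]
      rfl

theorem pvEmpty_iff (fuel pos : List Int) (w : Nat) (st : PySem.Dict (Int × Bool) Int)
    (h : pvInv fuel pos w st) : st.size = 0 ↔ pvAlive fuel pos w = false := by
  obtain ⟨hnd, hget⟩ := h
  constructor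
  · intro hsz
    have hnil : st.items = [] := List.eq_nil_of_length_eq_zero hsz
    have hS : ∀ (l : Nat) (side : Bool), pvS fuel pos w l side = none := by
      intro l side
      have h1 := hget (l : Int) side
      rw [PySem.Dict.get?, hnil] at h1
      simp only [List.find?_nil, Option.map_none] at h1
      rw [pvS'] at h1
      simp only [Int.natCast_nonneg, if_pos, Int.toNat_natCast] at h1
      exact h1.symm
    rw [pvAlive, List.any_eq_false]
    intro l hl
    simp [hS]
  · intro hAl
    by_contra hsz
    have hne : st.items ≠ [] := by
      intro hh
      exact hsz (by simp [PySem.Dict.size, hh])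
    obtain ⟨⟨⟨l, side⟩, v⟩, hmem⟩ := List.exists_mem_of_ne_nil _ hne
    have hg : st.get? (l, side) = some v :=
      (PySem.Dict.get?_eq_some_iff_mem_items st _ v hnd).2 hmem
    rw [hget l side, pvS'] at hg
    split at hg
    · have hsome : pvS fuel pos w l.toNat side ≠ none := by simp [hg]
      have hlt := pvS_lt fuel pos w l.toNat side hsome
      rw [pvAlive, List.any_eq_false] at hAl
      have := hAl l.toNat (List.mem_range.2 (by omega))
      cases side <;> simp [hg] at this
    · simp at hg

theorem pvA_loop_spec (fuel pos : List Int) :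
    ∀ (k : Nat) (w : Nat) (st : PySem.Dict (Int × Bool) Int), pvInv fuel pos w st →
    pvA_loop fuel pos k st ((w : Int) - 1) = pvSpecLoop fuel pos k w := by
  intro k
  induction k with
  | zero =>
    intro w st hinv
    show (w : Int) - 1 + 1 = _
    rw [pvSpecLoop]
    omega
  | succ k ih =>
    intro w st hinv
    rw [pvA_loop, pvSpecLoop]
    by_cases hsz : st.size = 0
    · rw [if_pos hsz, (pvEmpty_iff fuel pos w st hinv).1 hsz]
      simp only [Bool.false_eq_true, if_false]
      omega
    · have halive : pvAlive fuel pos w = true := by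
        cases hA : pvAlive fuel pos w
        · exact absurd ((pvEmpty_iff fuel pos w st hinv).2 hA) hsz
        · rfl
      rw [if_neg hsz, halive, if_pos rfl]
      show pvA_loop fuel pos k
          (st.items.foldl (pvA_body fuel pos ((w : Int) - 1 + 1)) (PySem.Dict.mk []))
          ((w : Int) - 1 + 1) = pvSpecLoop fuel pos k (w + 1)
      have hw0 : (w : Int) - 1 + 1 = (w : Int) := by ring
      rw [hw0]
      set S := st.items.foldl (pvA_body fuel pos (w : Int)) (PySem.Dict.mk []) with hS
      rw [show ((w : Int)) = ((w + 1 : Nat) : Int) - 1 from by push_cast; ring]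
      exact ih (w + 1) S (hS ▸ pvStepA fuel pos w st hinv)

theorem pvInit_inv (fuel pos : List Int) :
    pvInv fuel pos 0 ((PySem.List.pyRange 0 (pos.length : Int)).foldl
      (fun st i => st.insert (i, true) (PySem.List.pyGetD fuel i 0)) (PySem.Dict.mk [])) := by
  have main : ∀ (m : Nat),
      ((PySem.List.pyRange 0 (m : Int)).foldl
        (fun st i => st.insert (i, true) (PySem.List.pyGetD fuel i 0))
        (PySem.Dict.mk [])).keys.Nodup
      ∧ ∀ (l : Int) (side : Bool),
        ((PySem.List.pyRange 0 (m : Int)).foldl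
          (fun st i => st.insert (i, true) (PySem.List.pyGetD fuel i 0))
          (PySem.Dict.mk [])).get? (l, side)
        = if side = true ∧ 0 ≤ l ∧ l < (m : Int) then some (PySem.List.pyGetD fuel l 0)
          else none := by
    intro m
    induction m with
    | zero =>
      constructor
      · simp [PySem.List.pyRange, PySem.Dict.keys]
      · intro l side
        rw [show PySem.List.pyRange 0 ((0 : Nat) : Int) = [] from rfl]
        simp only [List.foldl_nil]
        rw [show (PySem.Dict.mk [] : PySem.Dict (Int × Bool) Int).get? (l, side) = none from rfl]
        split
        · omega
        · rfl
    | succ m ih =>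
      rw [show ((m + 1 : Nat) : Int) = (m : Int) + 1 by push_cast; ring,
        PySem.List.pyRange_one_succ_right (by positivity), List.foldl_append]
      refine ⟨PySem.Dict.nodup_keys_insert _ _ _ ih.1, ?_⟩
      intro l side
      simp only [List.foldl_cons, List.foldl_nil]
      rw [PySem.Dict.get?_insert, ih.2 l side]
      by_cases hls : (l, side) = ((m : Int), true)
      · rw [if_pos hls]
        obtain ⟨hl, hs⟩ := Prod.mk.injEq .. ▸ hls
        subst hl
        rw [if_pos ⟨by simpa using hs, by positivity, by omega⟩]
      · rw [if_neg hls]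
        by_cases hcond : side = true ∧ 0 ≤ l ∧ l < (m : Int)
        · rw [if_pos hcond, if_pos ⟨hcond.1, hcond.2.1, by omega⟩]
        · rw [if_neg hcond, if_neg ?_]
          intro hc
          apply hcond
          refine ⟨hc.1, hc.2.1, ?_⟩
          rcases lt_or_eq_of_le (Int.lt_add_one_iff.1 hc.2.2) with h | h
          · exact h
          · exact absurd (Prod.ext (by simpa using h) (by simpa using hc.1)) hls
  refine ⟨(main pos.length).1, ?_⟩
  intro l side
  rw [(main pos.length).2 l side, pvS']
  by_cases h0 : 0 ≤ l
  · rw [if_pos h0, pvS]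
    by_cases hcond : side = true ∧ l.toNat < pos.length
    · rw [if_pos hcond, if_pos ⟨hcond.1, h0, by omega⟩]
      rw [show l = ((l.toNat : Nat) : Int) from by omega, PySem.List.pyGetD_natCast,
        Int.toNat_natCast]
    · rw [if_neg hcond, if_neg ?_]
      intro hc
      exact hcond ⟨hc.1, by omega⟩
  · rw [if_neg h0, if_neg ?_]
    intro hc
    exact h0 hc.2.1

theorem pvA_eq_spec (fuel pos : List Int) :
    solution fuel pos = pvSpecLoop fuel pos (pos.length + 2) 0 := by
  rw [solution]
  rw [show (-1 : Int) = ((0 : Nat) : Int) - 1 from by norm_num]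
  exact pvA_loop_spec fuel pos (pos.length + 2) 0 _ (pvInit_inv fuel pos)

-- ===== B side =====

theorem pvCmb_dup (o : Option Int) : pvCmb (pvCmb none o) o = pvCmb (pvCmb none none) o := by
  cases o with
  | none => rfl
  | some v =>
    simp only [pvCmb, Option.getD_some, Option.getD_none]
    rw [max_assoc, max_self]

theorem pvMergeB (o1 o2 : Option Int) (a1 b1 a2 b2 fv : Int) :
    (match o2 with
     | some t =>
       if 0 ≤ t - a2 + b2 ∧
           ((match o1 with
             | some t => if 0 ≤ t - a1 + b1 then some (t - a1 + b1) else (none : Option Int)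
             | none => none) = none ∨
            (match o1 with
             | some t => if 0 ≤ t - a1 + b1 then some (t - a1 + b1) else (none : Option Int)
             | none => none).getD 0 < t - a2 + b2)
       then some (t - a2 + b2)
       else (match o1 with
             | some t => if 0 ≤ t - a1 + b1 then some (t - a1 + b1) else (none : Option Int)
             | none => none)
     | none => (match o1 with
             | some t => if 0 ≤ t - a1 + b1 then some (t - a1 + b1) else (none : Option Int)
             | none => none)).map (fun c => max 0 (c + fv))
    = pvCmb (pvCmb none ((pvExt o1 a1 b1).map (· + fv))) ((pvExt o2 a2 b2).map (· + fv)) := by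
  cases o1 with
  | none =>
    cases o2 with
    | none => rfl
    | some t2 =>
      by_cases h2 : (0:Int) ≤ t2 - a2 + b2 <;> simp [pvExt, pvCmb, h2]
  | some t1 =>
    cases o2 with
    | none =>
      by_cases h1 : (0:Int) ≤ t1 - a1 + b1 <;> simp [pvExt, pvCmb, h1]
    | some t2 =>
      by_cases h1 : (0:Int) ≤ t1 - a1 + b1 <;> by_cases h2 : (0:Int) ≤ t2 - a2 + b2 <;>
        simp [pvExt, pvCmb, h1, h2] <;>
        (try by_cases hc : t1 - a1 + b1 < t2 - a2 + b2 <;> simp [hc]) <;>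
        (try simp only [Int.max_def]) <;> (try split_ifs) <;> omega

theorem pvAlive_false_of_ge (fuel pos : List Int) (w : Nat) (h : pos.length ≤ w) :
    pvAlive fuel pos w = false := by
  rw [pvAlive, List.any_eq_false]
  intro l hl
  simp only [Bool.or_eq_true_iff, not_or]
  constructor <;>
    · intro hc
      have := pvS_lt fuel pos w l _ (by simpa [Option.isSome_iff_ne_none] using hc)
      omega

-- B's pull recurrence: value of interval [l, l+w] at an end, width-0 base at BOTH ends
def pvT (fuel pos : List Int) : Nat → Nat → Bool → Option Int
  | 0, l, _ => some (fuel.getD l 0)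
  | w + 1, l, side =>
    if side = true then
      pvCmb (pvCmb none
          ((pvExt (pvT fuel pos w l false) (pos.getD (l+w+1) 0) (pos.getD l 0)).map
            (· + fuel.getD (l+w+1) 0)))
        ((pvExt (pvT fuel pos w l true) (pos.getD (l+w+1) 0) (pos.getD (l+w) 0)).map
          (· + fuel.getD (l+w+1) 0))
    else
      pvCmb (pvCmb none
          ((pvExt (pvT fuel pos w (l+1) false) (pos.getD (l+1) 0) (pos.getD l 0)).map
            (· + fuel.getD l 0)))
        ((pvExt (pvT fuel pos w (l+1) true) (pos.getD (l+w+1) 0) (pos.getD l 0)).map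
          (· + fuel.getD l 0))

def pvReach (fuel pos : List Int) (w l : Nat) : Bool :=
  (pvT fuel pos w l false).isSome || (pvT fuel pos w l true).isSome

-- widest reachable interval with left end l / over all widths
def pvBW (fuel pos : List Int) (l : Nat) : Nat :=
  Nat.findGreatest (fun w => l + w < pos.length ∧ pvReach fuel pos w l = true) pos.length

def pvW (fuel pos : List Int) : Nat :=
  Nat.findGreatest (fun w => pvAlive fuel pos w = true) pos.length

theorem pvT_zero (fuel pos : List Int) (l : Nat) (side : Bool) :
    pvT fuel pos 0 l side = some (fuel.getD l 0) := rfl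

theorem pvReach_zero (fuel pos : List Int) (l : Nat) : pvReach fuel pos 0 l = true := rfl

theorem pvT_succ_eq (fuel pos : List Int) :
    ∀ w l side, l + w + 1 < pos.length →
      pvT fuel pos (w + 1) l side = pvS fuel pos (w + 1) l side := by
  intro w
  induction w with
  | zero =>
    intro l side hb
    have hl0 : l < pos.length := by omega
    have hl1 : l + 1 < pos.length := by omega
    cases side
    · rw [pvT, pvS]
      simp only [Bool.false_eq_true, if_false, Nat.add_zero, pvT_zero]
      rw [show pvS fuel pos 0 (l+1) false = none from by simp [pvS],
        show pvS fuel pos 0 (l+1) true = some (fuel.getD (l+1) 0) from by simp [pvS, hl1]]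
      rw [show (pvExt (none : Option Int) (pos.getD (l+1) 0) (pos.getD l 0)) = none from rfl]
      exact pvCmb_dup _
    · rw [pvT, pvS]
      simp only [if_true, ite_true, Nat.add_zero, pvT_zero]
      rw [if_pos hb]
      rw [show pvS fuel pos 0 l false = none from by simp [pvS],
        show pvS fuel pos 0 l true = some (fuel.getD l 0) from by simp [pvS, hl0]]
      rw [show (pvExt (none : Option Int) (pos.getD (l+0+1) 0) (pos.getD l 0)) = none from rfl]
      exact pvCmb_dup _
  | succ w ih =>
    intro l side hb
    cases side
    · rw [pvT, pvS]
      simp only [Bool.false_eq_true, if_false]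
      rw [ih (l+1) false (by omega), ih (l+1) true (by omega)]
    · rw [pvT, pvS]
      simp only [if_true, ite_true]
      rw [if_pos hb]
      rw [ih l false (by omega), ih l true (by omega)]

theorem pvT_succ_none (fuel pos : List Int) (w l : Nat)
    (hf : pvT fuel pos w (l+1) false = none) (ht : pvT fuel pos w (l+1) true = none)
    (hf' : pvT fuel pos w l false = none) (ht' : pvT fuel pos w l true = none) :
    ∀ side, pvT fuel pos (w+1) l side = none := by
  intro side
  cases side <;> rw [pvT] <;> simp [hf, ht, hf', ht', pvExt, pvCmb]

theorem pvAlive_iff (fuel pos : List Int) (w : Nat) :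
    pvAlive fuel pos w = true ↔ ∃ l, l + w < pos.length ∧ pvReach fuel pos w l = true := by
  cases w with
  | zero =>
    constructor
    · intro h
      rw [pvAlive, List.any_eq_true] at h
      obtain ⟨l, hl, _⟩ := h
      exact ⟨l, by simpa using List.mem_range.1 hl, pvReach_zero fuel pos l⟩
    · rintro ⟨l, hb, _⟩
      rw [pvAlive, List.any_eq_true]
      refine ⟨l, List.mem_range.2 (by omega), ?_⟩
      simp [pvS, show l < pos.length from by omega]
  | succ w =>
    constructor
    · intro h
      rw [pvAlive, List.any_eq_true] at h
      obtain ⟨l, hl, hs⟩ := h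
      have hlt : l + (w+1) < pos.length := by
        rcases Bool.or_eq_true_iff.1 hs with h' | h' <;>
          exact pvS_lt fuel pos _ l _ (by
            simpa [Option.isSome_iff_ne_none] using h')
      refine ⟨l, hlt, ?_⟩
      rw [pvReach, pvT_succ_eq fuel pos w l false (by omega),
        pvT_succ_eq fuel pos w l true (by omega)]
      exact hs
    · rintro ⟨l, hb, hr⟩
      rw [pvAlive, List.any_eq_true]
      refine ⟨l, List.mem_range.2 (by omega), ?_⟩
      rw [pvReach, pvT_succ_eq fuel pos w l false (by omega),
        pvT_succ_eq fuel pos w l true (by omega)] at hr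
      exact hr

theorem pvAlive_down (fuel pos : List Int) (w : Nat)
    (h : pvAlive fuel pos (w + 1) = true) : pvAlive fuel pos w = true := by
  rw [pvAlive_iff] at h ⊢
  obtain ⟨l, hb, hr⟩ := h
  by_cases h1 : pvReach fuel pos w l = true
  · exact ⟨l, by omega, h1⟩
  by_cases h2 : pvReach fuel pos w (l+1) = true
  · exact ⟨l + 1, by omega, h2⟩
  · exfalso
    rw [pvReach, Bool.or_eq_true_iff, not_or] at h1 h2
    have hn := pvT_succ_none fuel pos w l
      (Option.not_isSome_iff_eq_none.1 h2.1) (Option.not_isSome_iff_eq_none.1 h2.2)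
      (Option.not_isSome_iff_eq_none.1 h1.1) (Option.not_isSome_iff_eq_none.1 h1.2)
    rw [pvReach, hn false, hn true] at hr
    simp at hr

theorem pvAlive_mono (fuel pos : List Int) (v w : Nat) (hvw : v ≤ w)
    (h : pvAlive fuel pos w = true) : pvAlive fuel pos v = true := by
  obtain ⟨d, rfl⟩ : ∃ d, w = v + d := ⟨w - v, by omega⟩
  clear hvw
  induction d with
  | zero => exact h
  | succ d ih => exact ih (pvAlive_down fuel pos (v + d) h)

-- the row invariant: arrays hold the row-l values on [l, n), mx is the last live cell
def pvRowOK (fuel pos : List Int) (l : Nat) (F T : List (Option Int)) (mx : Nat) : Prop :=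
  F.length = pos.length ∧ T.length = pos.length ∧
  (∀ r, r < pos.length → F.getD r none = if l ≤ r then pvT fuel pos (r - l) l false else none) ∧
  (∀ r, r < pos.length → T.getD r none = if l ≤ r then pvT fuel pos (r - l) l true else none) ∧
  l ≤ mx ∧ mx < pos.length ∧
  (∀ r, mx < r → r < pos.length → pvT fuel pos (r - l) l false = none ∧
    pvT fuel pos (r - l) l true = none) ∧
  pvReach fuel pos (mx - l) l = true

theorem pvDeadChain (fuel pos : List Int) (l r : Nat) (hlr : l < r)
    (h0 : pvT fuel pos (r - l) l false = none ∧ pvT fuel pos (r - l) l true = none)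
    (hprev : ∀ j, r ≤ j → j < pos.length →
      pvT fuel pos (j - (l + 1)) (l + 1) false = none ∧
      pvT fuel pos (j - (l + 1)) (l + 1) true = none) :
    ∀ j, r ≤ j → j < pos.length →
      pvT fuel pos (j - l) l false = none ∧ pvT fuel pos (j - l) l true = none := by
  intro j hj
  induction j, hj using Nat.le_induction with
  | base => intro _; exact h0
  | succ j hj ih =>
    intro hjn
    obtain ⟨cf, ct⟩ := ih (by omega)
    obtain ⟨pf, pt⟩ := hprev (j + 1) (by omega) hjn
    rw [show j + 1 - (l + 1) = j - l from by omega] at pf pt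
    have hn := pvT_succ_none fuel pos (j - l) l pf pt cf ct
    rw [show j + 1 - l = (j - l) + 1 from by omega]
    exact ⟨hn false, hn true⟩

theorem pvGetD_set (xs : List (Option Int)) (i j : Nat) (v : Option Int) :
    (xs.set i v).getD j none = if i = j ∧ i < xs.length then v else xs.getD j none := by
  rw [List.getD, List.getD, List.getElem?_set]
  by_cases h1 : i = j
  · subst h1
    by_cases h2 : i < xs.length
    · simp [h2]
    · rw [List.getElem?_eq_none (by omega)]
      simp [h2]
  · simp [h1]

theorem pvGetD_replicate (n j : Nat) :
    (List.replicate n (none : Option Int)).getD j none = none := by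
  rw [List.getD, List.getElem?_replicate]
  split <;> rfl

theorem pvB_step_eq (fuel pos : List Int) (l r : Nat) (hlr : l < r)
    (prevF prevT curF curT : List (Option Int))
    (hpf : prevF.getD r none = pvT fuel pos (r - (l+1)) (l+1) false)
    (hpt : prevT.getD r none = pvT fuel pos (r - (l+1)) (l+1) true)
    (hcf : curF.getD (r-1) none = pvT fuel pos (r-1-l) l false)
    (hct : curT.getD (r-1) none = pvT fuel pos (r-1-l) l true) :
    pvB_step fuel pos l r prevF prevT curF curT
      = (pvT fuel pos (r-l) l false, pvT fuel pos (r-l) l true) := by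
  obtain ⟨w, rfl⟩ : ∃ w, r = l + w + 1 := ⟨r - l - 1, by omega⟩
  rw [show l + w + 1 - (l+1) = w from by omega] at hpf hpt
  rw [show l + w + 1 - 1 - l = w from by omega] at hcf hct
  rw [show l + w + 1 - l = w + 1 from by omega]
  simp only [pvB_step]
  rw [hpf, hpt, hcf, hct, show l + w + 1 - 1 = l + w from by omega]
  rw [pvMergeB, pvMergeB]
  rw [show pvT fuel pos (w+1) l false = pvCmb (pvCmb none
          ((pvExt (pvT fuel pos w (l+1) false) (pos.getD (l+1) 0) (pos.getD l 0)).map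
            (· + fuel.getD l 0)))
        ((pvExt (pvT fuel pos w (l+1) true) (pos.getD (l+w+1) 0) (pos.getD l 0)).map
          (· + fuel.getD l 0)) from by rw [pvT]; simp,
    show pvT fuel pos (w+1) l true = pvCmb (pvCmb none
          ((pvExt (pvT fuel pos w l false) (pos.getD (l+w+1) 0) (pos.getD l 0)).map
            (· + fuel.getD (l+w+1) 0)))
        ((pvExt (pvT fuel pos w l true) (pos.getD (l+w+1) 0) (pos.getD (l+w) 0)).map
          (· + fuel.getD (l+w+1) 0)) from by rw [pvT]; simp]
theorem pvB_finish (fuel pos : List Int) (l : Nat) (curF curT : List (Option Int)) (mx r : Nat)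
    (hr : r + 1 = pos.length) (hl : l ≤ r)
    (hlen1 : curF.length = pos.length) (hlen2 : curT.length = pos.length)
    (hF : ∀ j, curF.getD j none = if l ≤ j ∧ j ≤ r then pvT fuel pos (j-l) l false else none)
    (hT : ∀ j, curT.getD j none = if l ≤ j ∧ j ≤ r then pvT fuel pos (j-l) l true else none)
    (hmx1 : l ≤ mx) (hmx2 : mx ≤ r)
    (hreach : pvReach fuel pos (mx - l) l = true)
    (hdead : ∀ j, mx < j → j ≤ r →
      pvT fuel pos (j-l) l false = none ∧ pvT fuel pos (j-l) l true = none) :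
    pvRowOK fuel pos l curF curT mx := by
  refine ⟨hlen1, hlen2, ?_, ?_, hmx1, by omega, ?_, hreach⟩
  · intro r' hr'
    rw [hF r']
    by_cases h : l ≤ r'
    · rw [if_pos ⟨h, by omega⟩, if_pos h]
    · rw [if_neg (by tauto), if_neg h]
  · intro r' hr'
    rw [hT r']
    by_cases h : l ≤ r'
    · rw [if_pos ⟨h, by omega⟩, if_pos h]
    · rw [if_neg (by tauto), if_neg h]
  · intro j h1 h2
    exact hdead j h1 (by omega)

theorem pvB_while_inv (fuel pos : List Int) (n l prevMax : Nat)
    (prevF prevT : List (Option Int))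
    (hn : n = pos.length) (hln : l < n)
    (hprev : l + 1 < n → pvRowOK fuel pos (l + 1) prevF prevT prevMax) :
    ∀ (k r : Nat) (curF curT : List (Option Int)) (mx : Nat),
      l ≤ r → r < n → n - 1 ≤ r + k →
      curF.length = n → curT.length = n →
      (∀ j, curF.getD j none = if l ≤ j ∧ j ≤ r then pvT fuel pos (j-l) l false else none) →
      (∀ j, curT.getD j none = if l ≤ j ∧ j ≤ r then pvT fuel pos (j-l) l true else none) →
      l ≤ mx → mx ≤ r →
      pvReach fuel pos (mx - l) l = true →
      (∀ j, mx < j → j ≤ r →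
        pvT fuel pos (j-l) l false = none ∧ pvT fuel pos (j-l) l true = none) →
      pvRowOK fuel pos l
        (pvB_while fuel pos n l prevMax prevF prevT k r curF curT mx).1
        (pvB_while fuel pos n l prevMax prevF prevT k r curF curT mx).2.1
        (pvB_while fuel pos n l prevMax prevF prevT k r curF curT mx).2.2 := by
  subst hn
  intro k
  induction k with
  | zero =>
    intro r curF curT mx hlr hrn hk hlen1 hlen2 hF hT hmx1 hmx2 hreach hdead
    rw [pvB_while]
    exact pvB_finish fuel pos l curF curT mx r (by omega) hlr hlen1 hlen2 hF hT hmx1 hmx2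
      hreach hdead
  | succ k ih =>
    intro r curF curT mx hlr hrn hk hlen1 hlen2 hF hT hmx1 hmx2 hreach hdead
    rw [pvB_while]
    by_cases hg : r + 1 < pos.length ∧ (r ≤ prevMax ∨ (curF.getD r none).isSome
        ∨ (curT.getD r none).isSome)
    · rw [if_pos hg]
      have hprevOK := hprev (by omega)
      obtain ⟨hpl1, hpl2, hpF, hpT, _, _, _, _⟩ := hprevOK
      have hstep : pvB_step fuel pos l (r+1) prevF prevT curF curT
          = (pvT fuel pos (r+1-l) l false, pvT fuel pos (r+1-l) l true) := by
        apply pvB_step_eq fuel pos l (r+1) (by omega)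
        · rw [hpF (r+1) (by omega), if_pos (by omega)]
        · rw [hpT (r+1) (by omega), if_pos (by omega)]
        · rw [show r + 1 - 1 = r from rfl, hF r, if_pos ⟨hlr, le_refl r⟩]
        · rw [show r + 1 - 1 = r from rfl, hT r, if_pos ⟨hlr, le_refl r⟩]
      rw [hstep]
      have hF' : ∀ j, (curF.set (r+1) (pvT fuel pos (r+1-l) l false, pvT fuel pos (r+1-l) l true).1).getD j none
          = if l ≤ j ∧ j ≤ r+1 then pvT fuel pos (j-l) l false else none := by
        intro j
        rw [pvGetD_set]
        by_cases hj : r + 1 = j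
        · subst hj
          rw [if_pos ⟨rfl, by omega⟩, if_pos ⟨by omega, le_refl _⟩]
        · rw [if_neg (by tauto), hF j]
          by_cases hc : l ≤ j ∧ j ≤ r
          · rw [if_pos hc, if_pos ⟨hc.1, by omega⟩]
          · rw [if_neg hc, if_neg (by rintro ⟨h1, h2⟩; exact hc ⟨h1, by omega⟩)]
      have hT' : ∀ j, (curT.set (r+1) (pvT fuel pos (r+1-l) l false, pvT fuel pos (r+1-l) l true).2).getD j none
          = if l ≤ j ∧ j ≤ r+1 then pvT fuel pos (j-l) l true else none := by
        intro j
        rw [pvGetD_set]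
        by_cases hj : r + 1 = j
        · subst hj
          rw [if_pos ⟨rfl, by omega⟩, if_pos ⟨by omega, le_refl _⟩]
        · rw [if_neg (by tauto), hT j]
          by_cases hc : l ≤ j ∧ j ≤ r
          · rw [if_pos hc, if_pos ⟨hc.1, by omega⟩]
          · rw [if_neg hc, if_neg (by rintro ⟨h1, h2⟩; exact hc ⟨h1, by omega⟩)]
      by_cases hsome : ((pvT fuel pos (r+1-l) l false, pvT fuel pos (r+1-l) l true).1.isSome : Prop)
          ∨ ((pvT fuel pos (r+1-l) l false, pvT fuel pos (r+1-l) l true).2.isSome : Prop)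
      · rw [if_pos hsome]
        apply ih (r+1) _ _ (r+1) (by omega) (by omega) (by omega)
          (by rw [List.length_set]; exact hlen1) (by rw [List.length_set]; exact hlen2)
          hF' hT' (by omega) (le_refl _)
        · rw [pvReach]
          rcases hsome with h | h
          · rw [Bool.or_eq_true_iff]; exact Or.inl h
          · rw [Bool.or_eq_true_iff]; exact Or.inr h
        · intro j h1 h2
          omega
      · rw [if_neg hsome]
        push_neg at hsome
        apply ih (r+1) _ _ mx (by omega) (by omega) (by omega)
          (by rw [List.length_set]; exact hlen1) (by rw [List.length_set]; exact hlen2)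
          hF' hT' hmx1 (by omega) hreach
        intro j h1 h2
        by_cases hj : j ≤ r
        · exact hdead j h1 hj
        · have hjr : j = r + 1 := by omega
          subst hjr
          exact ⟨Option.not_isSome_iff_eq_none.1 hsome.1,
            Option.not_isSome_iff_eq_none.1 hsome.2⟩
    · rw [if_neg hg]
      by_cases hr1 : r + 1 < pos.length
      · -- exit because the row is provably dead from r on
        have hcond : ¬ (r ≤ prevMax ∨ ((curF.getD r none).isSome : Prop)
            ∨ ((curT.getD r none).isSome : Prop)) := by tauto
        push_neg at hcond
        obtain ⟨hpm, hsf, hst⟩ := hcond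
        have hlr' : l < r := by
          rcases Nat.lt_or_ge l r with h | h
          · exact h
          · exfalso
            have : l = r := by omega
            subst this
            rw [hF l, if_pos ⟨le_refl l, le_refl l⟩] at hsf
            simp [pvT_zero] at hsf
        have hcf : pvT fuel pos (r - l) l false = none := by
          have := hF r
          rw [if_pos ⟨by omega, le_refl r⟩] at this
          rw [← this]
          exact Option.not_isSome_iff_eq_none.1 hsf
        have hct : pvT fuel pos (r - l) l true = none := by
          have := hT r
          rw [if_pos ⟨by omega, le_refl r⟩] at this
          rw [← this]
          exact Option.not_isSome_iff_eq_none.1 hst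
        have hprevOK := hprev (by omega)
        obtain ⟨_, _, _, _, _, _, hpdead, _⟩ := hprevOK
        have hchain := pvDeadChain fuel pos l r hlr' ⟨hcf, hct⟩
          (fun j hj hjn => hpdead j (by omega) hjn)
        show pvRowOK fuel pos l curF curT mx
        refine ⟨hlen1, hlen2, ?_, ?_, hmx1, by omega, ?_, hreach⟩
        · intro r' hr'
          rw [hF r']
          by_cases h : l ≤ r'
          · by_cases h2 : r' ≤ r
            · rw [if_pos ⟨h, h2⟩, if_pos h]
            · rw [if_neg (by tauto), if_pos h, (hchain r' (by omega) hr').1]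
          · rw [if_neg (by tauto), if_neg h]
        · intro r' hr'
          rw [hT r']
          by_cases h : l ≤ r'
          · by_cases h2 : r' ≤ r
            · rw [if_pos ⟨h, h2⟩, if_pos h]
            · rw [if_neg (by tauto), if_pos h, (hchain r' (by omega) hr').2]
          · rw [if_neg (by tauto), if_neg h]
        · intro j h1 h2
          by_cases hj : j ≤ r
          · exact hdead j h1 hj
          · exact hchain j (by omega) h2
      · exact pvB_finish fuel pos l curF curT mx r (by omega) hlr hlen1 hlen2 hF hT hmx1 hmx2
          hreach hdead

theorem pvB_row_spec (fuel pos : List Int) (n l : Nat) (hn : n = pos.length) (hl : l < n)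
    (prevMax : Nat) (prevF prevT : List (Option Int))
    (hprev : l + 1 < n → pvRowOK fuel pos (l + 1) prevF prevT prevMax) :
    pvRowOK fuel pos l (pvB_row fuel pos n l prevMax prevF prevT).1
      (pvB_row fuel pos n l prevMax prevF prevT).2.1
      (pvB_row fuel pos n l prevMax prevF prevT).2.2 := by
  rw [pvB_row]
  have harr : ∀ (side : Bool) (j : Nat), ((List.replicate n (none : Option Int)).set l
      (some (fuel.getD l 0))).getD j none
      = if l ≤ j ∧ j ≤ l then pvT fuel pos (j - l) l side else none := by
    intro side j
    rw [pvGetD_set]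
    by_cases hj : l = j
    · subst hj
      rw [if_pos ⟨rfl, by rw [List.length_replicate]; omega⟩,
        if_pos ⟨le_refl l, le_refl l⟩, Nat.sub_self, pvT_zero]
    · rw [if_neg (by tauto), pvGetD_replicate, if_neg (by omega)]
  apply pvB_while_inv fuel pos n l prevMax prevF prevT hn hl hprev (n-1) l _ _ l
    (le_refl l) hl (by omega)
    (by rw [List.length_set, List.length_replicate])
    (by rw [List.length_set, List.length_replicate])
    (harr false) (harr true) (le_refl l) (le_refl l)
    (by rw [Nat.sub_self]; exact pvReach_zero fuel pos l)
    (by intro j h1 h2; omega)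

theorem pvRowOK_mx (fuel pos : List Int) (l : Nat) (F T : List (Option Int)) (mx : Nat)
    (h : pvRowOK fuel pos l F T mx) : mx = l + pvBW fuel pos l := by
  obtain ⟨_, _, _, _, hmx1, hmx2, hdead, hreach⟩ := h
  have h1 : mx - l ≤ pvBW fuel pos l :=
    Nat.le_findGreatest (by omega) ⟨by omega, hreach⟩
  have h2 : pvBW fuel pos l ≤ mx - l := by
    by_contra hc
    push_neg at hc
    have hPbw : l + pvBW fuel pos l < pos.length ∧
        pvReach fuel pos (pvBW fuel pos l) l = true :=
      Nat.findGreatest_spec (P := fun w => l + w < pos.length ∧ pvReach fuel pos w l = true)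
        (show mx - l ≤ pos.length by omega) ⟨by omega, hreach⟩
    have hd := hdead (l + pvBW fuel pos l) (by omega) (by omega)
    rw [show l + pvBW fuel pos l - l = pvBW fuel pos l from by omega] at hd
    rw [pvReach, hd.1, hd.2] at hPbw
    simp at hPbw
  omega

-- suffix maximum of pvBW over [l, n)
def pvMB (fuel pos : List Int) (l : Nat) : Nat :=
  ((List.range' l (pos.length - l)).map (pvBW fuel pos)).foldr max 0

theorem pvMB_rec (fuel pos : List Int) (l : Nat) (h : l < pos.length) :
    pvMB fuel pos l = max (pvBW fuel pos l) (pvMB fuel pos (l+1)) := by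
  rw [pvMB, pvMB, show pos.length - l = (pos.length - (l+1)) + 1 from by omega,
    List.range'_succ, List.map_cons, List.foldr_cons]

def pvStOK (fuel pos : List Int) (l : Nat)
    (st : List (Option Int) × List (Option Int) × Nat × Int) : Prop :=
  pvRowOK fuel pos l st.1 st.2.1 st.2.2.1 ∧
    st.2.2.2 = ((pvMB fuel pos l + 1 : Nat) : Int)

theorem pvIfMax (a b : Nat) :
    (if ((a : Nat) : Int) < ((b : Nat) : Int) then ((b : Nat) : Int) else ((a : Nat) : Int))
      = ((max a b : Nat) : Int) := by
  split_ifs with h <;> push_cast <;> omega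

theorem pvB_outerStep_ok (fuel pos : List Int) (n l : Nat) (hn : n = pos.length) (hl : l < n)
    (st : List (Option Int) × List (Option Int) × Nat × Int)
    (h1 : l + 1 < n → pvStOK fuel pos (l + 1) st)
    (h2 : l + 1 = n → st.2.2.2 = 1) :
    pvStOK fuel pos l (pvB_outer fuel pos n st l) := by
  have hrow := pvB_row_spec fuel pos n l hn hl st.2.2.1 st.1 st.2.1 (fun h => (h1 h).1)
  have hmx := pvRowOK_mx fuel pos l _ _ _ hrow
  constructor
  · exact hrow
  · show (if st.2.2.2 < (((pvB_row fuel pos n l st.2.2.1 st.1 st.2.1).2.2 - l + 1 : Nat) : Int)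
      then (((pvB_row fuel pos n l st.2.2.1 st.1 st.2.1).2.2 - l + 1 : Nat) : Int)
      else st.2.2.2) = _
    rw [hmx, show l + pvBW fuel pos l - l + 1 = pvBW fuel pos l + 1 from by omega]
    by_cases hend : l + 1 < n
    · rw [(h1 hend).2, pvIfMax (pvMB fuel pos (l+1) + 1) (pvBW fuel pos l + 1)]
      rw [pvMB_rec fuel pos l (by omega)]
      congr 1
      omega
    · rw [h2 (by omega)]
      rw [pvMB_rec fuel pos l (by omega),
        show pvMB fuel pos (l+1) = 0 from by
          rw [pvMB, show pos.length - (l+1) = 0 from by omega]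
          rfl]
      rw [show (1 : Int) = ((1 : Nat) : Int) from rfl, pvIfMax 1 (pvBW fuel pos l + 1)]
      congr 1
      omega

theorem pvB_fold_ok (fuel pos : List Int) (n : Nat) (hn : n = pos.length) :
    ∀ (d l : Nat), d + l = n → 0 < d →
      pvStOK fuel pos l (((List.range' l (n - l)).reverse).foldl (pvB_outer fuel pos n)
        (List.replicate n (none : Option Int), List.replicate n (none : Option Int),
          n - 1, (1 : Int))) := by
  intro d
  induction d with
  | zero => intro l h h0; omega
  | succ d ih =>
    intro l h h0
    rw [show n - l = (n - (l+1)) + 1 from by omega, List.range'_succ, List.reverse_cons,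
      List.foldl_append, List.foldl_cons, List.foldl_nil]
    by_cases hd : 0 < d
    · exact pvB_outerStep_ok fuel pos n l hn (by omega) _
        (fun _ => by
          have := ih (l+1) (by omega) hd
          exact this)
        (fun hc => by omega)
    · have hd0 : d = 0 := by omega
      subst hd0
      have hl : l + 1 = n := by omega
      rw [show n - (l+1) = 0 from by omega]
      exact pvB_outerStep_ok fuel pos n l hn (by omega) _
        (fun hc => by omega) (fun _ => rfl)

theorem pvFoldrMax_le (xs : List Nat) (b : Nat) (h : ∀ x ∈ xs, x ≤ b) :
    xs.foldr max 0 ≤ b := by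
  induction xs with
  | nil => exact Nat.zero_le b
  | cons x xs ih =>
    simp only [List.foldr_cons]
    have h1 := h x List.mem_cons_self
    have h2 := ih (fun y hy => h y (List.mem_cons_of_mem _ hy))
    omega

theorem pvLe_foldrMax (xs : List Nat) (x : Nat) (hx : x ∈ xs) : x ≤ xs.foldr max 0 := by
  induction xs with
  | nil => cases hx
  | cons y ys ih =>
    simp only [List.foldr_cons]
    rcases List.mem_cons.1 hx with rfl | h
    · exact le_max_left _ _
    · exact le_trans (ih h) (le_max_right _ _)

theorem pvW_alive (fuel pos : List Int) (hn : 0 < pos.length) :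
    ∀ w, w ≤ pvW fuel pos → pvAlive fuel pos w = true := by
  have h0 : pvAlive fuel pos 0 = true :=
    (pvAlive_iff fuel pos 0).2 ⟨0, by omega, pvReach_zero fuel pos 0⟩
  have hW : pvAlive fuel pos (pvW fuel pos) = true :=
    Nat.findGreatest_spec (P := fun w => pvAlive fuel pos w = true) (Nat.zero_le _) h0
  intro w hw
  exact pvAlive_mono fuel pos w (pvW fuel pos) hw hW

theorem pvW_notalive (fuel pos : List Int) :
    pvAlive fuel pos (pvW fuel pos + 1) = false := by
  by_contra hc
  have hal : pvAlive fuel pos (pvW fuel pos + 1) = true := by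
    cases h : pvAlive fuel pos (pvW fuel pos + 1)
    · exact absurd h hc
    · rfl
  have hb : pvW fuel pos + 1 ≤ pos.length := by
    obtain ⟨l, hbnd, _⟩ := (pvAlive_iff fuel pos _).1 hal
    omega
  have := Nat.le_findGreatest (P := fun w => pvAlive fuel pos w = true) hb hal
  rw [← pvW] at this
  omega

theorem pvSpecLoop_W (fuel pos : List Int) (hn : 0 < pos.length) :
    ∀ k w, w ≤ pvW fuel pos + 1 → pvW fuel pos + 1 ≤ w + k →
      pvSpecLoop fuel pos k w = ((pvW fuel pos + 1 : Nat) : Int) := by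
  intro k
  induction k with
  | zero =>
    intro w h1 h2
    rw [pvSpecLoop]
    congr 1
    omega
  | succ k ih =>
    intro w h1 h2
    rw [pvSpecLoop]
    by_cases hw : w ≤ pvW fuel pos
    · rw [pvW_alive fuel pos hn w hw, if_pos rfl]
      exact ih (w+1) (by omega) (by omega)
    · have hw1 : w = pvW fuel pos + 1 := by omega
      rw [hw1, pvW_notalive fuel pos]
      simp

theorem pvMB_eq_W (fuel pos : List Int) (hn : 0 < pos.length) :
    pvMB fuel pos 0 = pvW fuel pos := by
  apply le_antisymm
  · apply pvFoldrMax_le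
    intro x hx
    obtain ⟨l, hl, rfl⟩ := List.mem_map.1 hx
    have hln : l < pos.length := by
      have := List.mem_range'_1.1 hl
      omega
    by_cases h0 : pvBW fuel pos l = 0
    · omega
    · have hP : l + pvBW fuel pos l < pos.length ∧
          pvReach fuel pos (pvBW fuel pos l) l = true :=
        Nat.findGreatest_spec
          (P := fun w => l + w < pos.length ∧ pvReach fuel pos w l = true)
          (Nat.zero_le _) ⟨by omega, pvReach_zero fuel pos l⟩
      have hal : pvAlive fuel pos (pvBW fuel pos l) = true :=
        (pvAlive_iff fuel pos _).2 ⟨l, hP.1, hP.2⟩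
      exact Nat.le_findGreatest (by omega) hal
  · have hW : pvAlive fuel pos (pvW fuel pos) = true := pvW_alive fuel pos hn _ (le_refl _)
    obtain ⟨l, hbnd, hr⟩ := (pvAlive_iff fuel pos _).1 hW
    have h1 : pvW fuel pos ≤ pvBW fuel pos l :=
      Nat.le_findGreatest (by omega) ⟨hbnd, hr⟩
    have h2 : pvBW fuel pos l ≤ pvMB fuel pos 0 := by
      apply pvLe_foldrMax
      exact List.mem_map_of_mem (by
        apply List.mem_range'_1.2
        omega)
    omega

theorem pvB_eq (fuel pos : List Int) (hn : 0 < pos.length) :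
    solution_alt fuel pos = ((pvMB fuel pos 0 + 1 : Nat) : Int) := by
  rw [solution_alt]
  simp only [show ¬ (pos.length = 0) from by omega, if_false, reduceIte]
  have := (pvB_fold_ok fuel pos pos.length rfl pos.length 0 (by omega) hn).2
  rw [Nat.sub_zero] at this
  rw [List.range_eq_range']
  exact this

-- ===== VERDICT (by name: the statement is the Claim_ definition above) =====
theorem solution_spec : Claim_equal_solution := by
  intro fuel pos _ _
  unfold Spec_solution
  rw [pvA_eq_spec]
  by_cases hn : 0 < pos.length
  · have hW : pvW fuel pos ≤ pos.length := Nat.findGreatest_le _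
    rw [pvSpecLoop_W fuel pos hn (pos.length + 2) 0 (by omega) (by omega),
      pvB_eq fuel pos hn, pvMB_eq_W fuel pos hn]
  · have h0 : pos.length = 0 := by omega
    rw [solution_alt]
    simp only [h0, reduceIte]
    simp [pvSpecLoop, pvAlive_false_of_ge fuel pos 0 (by omega)]
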